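-- pv_equiv track=rewrite | github.com/bactopia/bactopia.github.io | bin/generator_utils.py | render_output_tree
-- ===== SOURCE A (Python) =====
-- def render_output_tree(raw_paths):
--     """Render a list of file paths as a decorated tree."""
--     if not raw_paths:
--         return ''
--
--     sample_name = raw_paths[0].split('/')[0] if raw_paths else ''
--
--     # Collapse nf.command.* files into a single glob entry
--     nf_command_dirs = set()
--     filtered = []
--     for p in raw_paths:
--         basename = p.rsplit('/', 1)[-1]
--         if basename.startswith('nf.command.'):
--             parent = p.rsplit('/', 1)[0] if '/' in p else ''
--             if parent not in nf_command_dirs: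
--                 nf_command_dirs.add(parent)
--                 filtered.append(f'{parent}/nf.command.{{begin,err,log,out,run,sh,trace}}')
--             continue
--         filtered.append(p)
--
--     # Identify the bactopia-runs subdirectory name to add <TIMESTAMP>
--     runs_subdir = ''
--     for p in filtered:
--         parts = p.split('/')
--         if len(parts) >= 2 and parts[0] == 'bactopia-runs':
--             runs_subdir = parts[1]
--             break
--
--     cleaned = []
--     for p in filtered:
--         if sample_name:
--             p = p.replace(sample_name, '<SAMPLE_NAME>')
--         if runs_subdir:
--             parts = p.split('/')
--             parts = [f'{part}-<TIMESTAMP>' if part == runs_subdir else part for part in parts]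
--             p = '/'.join(parts)
--         cleaned.append(p)
--
--     tree = {}
--     for p in cleaned:
--         parts = p.split('/')
--         node = tree
--         for part in parts:
--             if part not in node:
--                 node[part] = {}
--             node = node[part]
--
--     def _render_tree(node, prefix=''):
--         lines = []
--         entries = sorted(node.keys())
--         for i, name in enumerate(entries):
--             is_last = (i == len(entries) - 1)
--             connector = '└── ' if is_last else '├── '
--             lines.append(f'{prefix}{connector}{name}')
--             child_prefix = prefix + ('    ' if is_last else '│   ')
--             lines.extend(_render_tree(node[name], child_prefix))
--         return lines
--
--     tree_lines = ['<BACTOPIA_DIR>']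
--     root_entries = sorted(tree.keys())
--     for i, name in enumerate(root_entries):
--         is_last = (i == len(root_entries) - 1)
--         connector = '└── ' if is_last else '├── '
--         tree_lines.append(f'{connector}{name}')
--         child_prefix = '    ' if is_last else '│   '
--         tree_lines.extend(_render_tree(tree[name], child_prefix))
--
--     return (
--         '### Expected Output Files\n\n'
--         + '```\n'
--         + '\n'.join(tree_lines)
--         + '\n```\n'
--     )
-- ===== SOURCE B (Python) =====
-- def render_output_tree(raw_paths):
--     """Render a list of file paths as a decorated tree.
--
--     Preprocessing (nf.command collapse, runs_subdir, sample_name/timestamp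
--     replacement) is unchanged; the nested-dict trie is replaced by a direct
--     recursive grouping of the sorted path-segment lists.
--     """
--     if not raw_paths:
--         return ''
--
--     sample_name = raw_paths[0].split('/')[0] if raw_paths else ''
--
--     # Collapse nf.command.* files into a single glob entry
--     nf_command_dirs = set()
--     filtered = []
--     for p in raw_paths:
--         basename = p.rsplit('/', 1)[-1]
--         if basename.startswith('nf.command.'):
--             parent = p.rsplit('/', 1)[0] if '/' in p else ''
--             if parent not in nf_command_dirs:
--                 nf_command_dirs.add(parent)
--                 filtered.append(f'{parent}/nf.command.{{begin,err,log,out,run,sh,trace}}')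
--             continue
--         filtered.append(p)
--
--     # Identify the bactopia-runs subdirectory name to add <TIMESTAMP>
--     runs_subdir = ''
--     for p in filtered:
--         parts = p.split('/')
--         if len(parts) >= 2 and parts[0] == 'bactopia-runs':
--             runs_subdir = parts[1]
--             break
--
--     cleaned = []
--     for p in filtered:
--         if sample_name:
--             p = p.replace(sample_name, '<SAMPLE_NAME>')
--         if runs_subdir:
--             parts = p.split('/')
--             parts = [f'{part}-<TIMESTAMP>' if part == runs_subdir else part for part in parts]
--             p = '/'.join(parts)
--         cleaned.append(p)
--
--     # Render directly from the segment lists: group by first segment in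
--     # sorted order, emit the connector line, recurse on non-empty remainders.
--     def _render(pss, prefix):
--         lines = []
--         groups = {}
--         for ps in pss:
--             if len(ps) > 1:
--                 groups.setdefault(ps[0], []).append(ps[1:])
--         names = sorted({ps[0] for ps in pss})
--         for i, name in enumerate(names):
--             is_last = (i == len(names) - 1)
--             lines.append(f'{prefix}{"└── " if is_last else "├── "}{name}')
--             lines.extend(_render(groups.get(name, []), prefix + ('    ' if is_last else '│   ')))
--         return lines
--
--     tree_lines = ['<BACTOPIA_DIR>'] + _render([p.split('/') for p in cleaned], '')
--
--     return (
--         '### Expected Output Files\n\n'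
--         + '```\n'
--         + '\n'.join(tree_lines)
--         + '\n```\n'
--     )
-- ===== Notes on version B (the rewrite author's own statement) =====
-- stated objective: alternative
-- what changed: Instead of building a nested-dict trie from the cleaned paths and then rendering it recursively over sorted keys, B renders directly from the list of path-segment lists: a recursive helper groups them by first segment in sorted order, emits the connector line for each distinct segment and recurses on the non-empty remainders (preprocessing is unchanged).
import Mathlib
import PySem

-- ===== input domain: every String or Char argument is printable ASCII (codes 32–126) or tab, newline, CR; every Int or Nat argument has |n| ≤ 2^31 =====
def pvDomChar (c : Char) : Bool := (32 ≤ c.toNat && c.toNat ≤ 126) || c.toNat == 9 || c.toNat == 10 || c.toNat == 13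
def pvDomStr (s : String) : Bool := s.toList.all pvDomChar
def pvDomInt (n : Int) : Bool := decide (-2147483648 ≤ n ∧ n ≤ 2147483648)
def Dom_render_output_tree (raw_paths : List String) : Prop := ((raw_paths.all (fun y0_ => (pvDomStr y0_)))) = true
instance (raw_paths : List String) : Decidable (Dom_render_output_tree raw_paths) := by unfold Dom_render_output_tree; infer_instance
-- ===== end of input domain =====

-- B replaces A's nested-dict trie (build it, then render it recursively with sorted keys) by a
-- direct recursive grouping of the path-segment lists; the preprocessing (nf.command collapse,
-- runs_subdir detection, sample_name/timestamp replacement) is shared and unchanged.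

-- ===== PORT A =====

-- p.split('/')  ('/' is a non-empty separator, so split? is always `some`)
def pvSplitSlash (p : String) : List String := (PySem.Str.split? p "/").getD []

-- p.rsplit('/', 1)[-1]  (exact for the one-character separator '/': the piece after the last '/')
def pvBasename (p : String) : String := (pvSplitSlash p).getLastD ""

-- p.rsplit('/', 1)[0] when '/' in p  (everything before the last '/')
def pvParent (p : String) : String := PySem.Str.join "/" (pvSplitSlash p).dropLast

-- the `for p in filtered: … break` loop looking for the bactopia-runs subdirectory
def pvFindRunsSubdir : List String → String
  | [] => ""
  | p :: rest =>
    match pvSplitSlash p with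
    | a :: b :: _ => if a == "bactopia-runs" then b else pvFindRunsSubdir rest
    | _ => pvFindRunsSubdir rest

-- the body of the `cleaned` loop for one path
def pvClean1 (sample_name runs_subdir : String) (p : String) : String :=
  let p1 := if sample_name == "" then p else PySem.Str.replace p sample_name "<SAMPLE_NAME>"
  if runs_subdir == "" then p1
  else PySem.Str.join "/"
    ((pvSplitSlash p1).map (fun part => if part == runs_subdir then part ++ "-<TIMESTAMP>" else part))

-- shared preprocessing: identical code in Source A and in Source B, producing `cleaned`
def pvCleanPaths (raw_paths : List String) : List String :=
  let sample_name := (pvSplitSlash (raw_paths.headD "")).headD ""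
  let filtered := (raw_paths.foldl (fun (st : PySem.Set String × List String) p =>
      if PySem.Str.startswith (pvBasename p) "nf.command." then
        let parent := if PySem.Str.isIn "/" p then pvParent p else ""
        if PySem.Set.contains st.1 parent then st
        else (PySem.Set.add st.1 parent,
              st.2 ++ [parent ++ "/nf.command.{begin,err,log,out,run,sh,trace}"])
      else (st.1, st.2 ++ [p])) (PySem.Set.empty, [])).2
  let runs_subdir := pvFindRunsSubdir filtered
  filtered.foldl (fun acc p => acc ++ [pvClean1 sample_name runs_subdir p]) []

-- A's nested dict-of-dicts (`tree = {}`); a mutual pair because a nested inductive is not allowed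
mutual
inductive PyTrie : Type where
  | node : PyTrieKids → PyTrie
inductive PyTrieKids : Type where
  | nil : PyTrieKids
  | cons : String → PyTrie → PyTrieKids → PyTrieKids
end

-- weights used only for the termination of the render recursion
mutual
def pvWT : PyTrie → Nat
  | .node kids => 1 + pvWK kids
def pvWK : PyTrieKids → Nat
  | .nil => 0
  | .cons _ t r => 1 + pvWT t + pvWK r
end

def pvWL (l : List (String × PyTrie)) : Nat := (l.map (fun e => 1 + pvWT e.2)).sum

def PyTrieKids.entries : PyTrieKids → List (String × PyTrie)
  | .nil => []
  | .cons k t r => (k, t) :: r.entries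

-- the insertion loop `node = tree; for part in parts: if part not in node: node[part] = {}; node = node[part]`
mutual
def PyTrie.insert : PyTrie → List String → PyTrie
  | t, [] => t
  | .node kids, s :: rest => .node (PyTrieKids.insertPath kids s rest)
  termination_by t ps => (ps.length, 0)
def PyTrieKids.insertPath : PyTrieKids → String → List String → PyTrieKids
  | .nil, s, rest => .cons s (PyTrie.insert (.node .nil) rest) .nil
  | .cons k t r, s, rest =>
    if k == s then .cons k (PyTrie.insert t rest) r else .cons k t (r.insertPath s rest)
  termination_by kids _ rest => (rest.length, sizeOf kids + 1)
end

theorem pvWL_entries : ∀ (kids : PyTrieKids), pvWL kids.entries = pvWK kids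
  | .nil => rfl
  | .cons k t r => by
    have := pvWL_entries r
    simp [PyTrieKids.entries, pvWL, pvWK] at *
    omega

theorem pvWL_sorted (l : List (String × PyTrie)) :
    pvWL (PySem.List.sorted l (fun e => e.1)) = pvWL l := by
  unfold pvWL
  exact List.Perm.sum_eq ((PySem.List.sorted_perm l (fun e => e.1) false).map _)

-- _render_tree: Python iterates `sorted(node.keys())` and indexes `node[name]`; since the dict's
-- keys are distinct this is exactly the entry list sorted by key, which is how it is transcribed
-- (keeping the child paired with its key is what makes the recursion terminate structurally)
mutual
def PyTrie.render : PyTrie → String → List String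
  | .node kids, pre => PyTrie.renderEntries (PySem.List.sorted kids.entries (fun e => e.1)) pre
  termination_by t _ => pvWT t
  decreasing_by simp [pvWL_sorted, pvWL_entries, pvWT]
def PyTrie.renderEntries : List (String × PyTrie) → String → List String
  | [], _ => []
  | [(name, c)], pre => (pre ++ "└── " ++ name) :: PyTrie.render c (pre ++ "    ")
  | (name, c) :: rest@(_ :: _), pre =>
    (pre ++ "├── " ++ name) :: (PyTrie.render c (pre ++ "│   ") ++ PyTrie.renderEntries rest pre)
  termination_by l _ => pvWL l
  decreasing_by all_goals (subst_vars; simp [pvWL] <;> omega)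
end

def render_output_tree (raw_paths : List String) : String :=
  if raw_paths.isEmpty then "" else
  let cleaned := pvCleanPaths raw_paths
  let tree := cleaned.foldl (fun t p => t.insert (pvSplitSlash p)) (PyTrie.node .nil)
  -- the inlined Python root loop is _render_tree with prefix '' (f'{connector}{name}' = '' ++ connector ++ name)
  let tree_lines := "<BACTOPIA_DIR>" :: PyTrie.render tree ""
  "### Expected Output Files\n\n" ++ "```\n" ++ PySem.Str.join "\n" tree_lines ++ "\n```\n"

-- ===== PORT B =====

-- [ps[1:] for ps in pss if ps[0] == name and len(ps) > 1]
def pvTails (name : String) (pss : List (List String)) : List (List String) :=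
  pss.filterMap (fun ps =>
    match ps with
    | x :: y :: t => if x == name then some (y :: t) else none
    | _ => none)

-- termination measure for the grouping recursion (elements of pss are never [] at run time)
def pvM (pss : List (List String)) : Nat := (pss.map (fun ps => ps.length + 1)).sum

theorem pvM_tails_add_length_le (name : String) (pss : List (List String)) :
    pvM (pvTails name pss) + pss.length ≤ pvM pss := by
  induction pss with
  | nil => simp [pvM, pvTails]
  | cons ps rest ih =>
    match ps with
    | [] => simp [pvM, pvTails] at *; omega
    | [x] => simp [pvM, pvTails] at *; omega
    | x :: y :: t =>
      by_cases h : x = name <;>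
        simp [pvM, pvTails, h] at * <;> omega

theorem pvM_tails_lt (name : String) (pss : List (List String)) (h : pss ≠ []) :
    pvM (pvTails name pss) < pvM pss := by
  have h1 := pvM_tails_add_length_le name pss
  have h2 : 0 < pss.length := List.length_pos_iff.mpr h
  omega

theorem pvSetFoldLen {α : Type} [BEq α] (l : List α) (s : PySem.Set α) :
    (l.foldl PySem.Set.add s).length ≤ s.length + l.length := by
  induction l generalizing s with
  | nil => simp
  | cons x rest ih =>
    simp only [List.foldl_cons]
    refine le_trans (ih _) ?_
    have : (PySem.Set.add s x).length ≤ s.length + 1 := by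
      unfold PySem.Set.add; split <;> simp
    simp; omega

theorem pvSetLen {α : Type} [BEq α] (l : List α) : (PySem.Set.ofList l).length ≤ l.length := by
  have := pvSetFoldLen l ([] : PySem.Set α)
  simpa [PySem.Set.ofList_eq_foldl] using this

-- groups = {}; for ps in pss: if len(ps) > 1: groups.setdefault(ps[0], []).append(ps[1:])
def pvGroups (pss : List (List String)) : PySem.Dict String (List (List String)) :=
  pss.foldl (fun d ps =>
    match ps with
    | x :: y :: t => d.modify x [] (· ++ [y :: t])
    | _ => d) PySem.Dict.empty

theorem pvGroups_getD_gen (name : String) :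
    ∀ (pss : List (List String)) (d : PySem.Dict String (List (List String))),
    ((pss.foldl (fun d ps =>
        match ps with
        | x :: y :: t => d.modify x [] (· ++ [y :: t])
        | _ => d) d).getD name []) = d.getD name [] ++ pvTails name pss
  | [], d => by simp [pvTails]
  | ps :: rest, d => by
    match ps with
    | [] => rw [List.foldl_cons, pvGroups_getD_gen name rest d]; simp [pvTails, List.filterMap_cons]
    | [x] => rw [List.foldl_cons, pvGroups_getD_gen name rest d]; simp [pvTails, List.filterMap_cons]
    | x :: y :: t =>
      rw [List.foldl_cons, pvGroups_getD_gen name rest _]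
      rw [PySem.Dict.getD_modify]
      by_cases h : x = name
      · simp [pvTails, List.filterMap_cons, h]
      · have h' : ¬ name = x := fun hh => h hh.symm
        simp [pvTails, List.filterMap_cons, h, h']

-- the per-level dict of remainder groups holds exactly the non-empty `name`-headed remainders
theorem pvGroups_getD (name : String) (pss : List (List String)) :
    (pvGroups pss).getD name [] = pvTails name pss := by
  rw [pvGroups, pvGroups_getD_gen name pss PySem.Dict.empty, PySem.Dict.getD_empty]
  rfl

-- _render: group the segment lists by their first segment into a dict in one pass, then emit
-- the connector line for each distinct first segment in sorted order and recurse on its group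
mutual
def pvRenderGroups (pss : List (List String)) (pre : String) : List String :=
  pvRenderNames (PySem.List.sorted (PySem.Set.ofList (pss.map (fun ps => ps.headD ""))) (fun x => x)) pss pre
  termination_by (pvM pss, 2 * pss.length + 2)
  decreasing_by
    apply Prod.Lex.right
    have h1 := pvSetLen (pss.map (fun ps => ps.headD ""))
    have h2 := (PySem.List.sorted_perm (PySem.Set.ofList (pss.map (fun ps => ps.headD ""))) (fun x : String => x) false).length_eq
    have h3 : (pss.map (fun ps => ps.headD "")).length = pss.length := List.length_map ..
    omega
def pvRenderNames : List String → List (List String) → String → List String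
  | [], _, _ => []
  | [name], pss, pre =>
    (pre ++ "└── " ++ name) :: pvRenderGroups ((pvGroups pss).getD name []) (pre ++ "    ")
  | name :: rest@(_ :: _), pss, pre =>
    (pre ++ "├── " ++ name) ::
      (pvRenderGroups ((pvGroups pss).getD name []) (pre ++ "│   ") ++ pvRenderNames rest pss pre)
  termination_by names pss _ => (pvM pss, 2 * names.length + 1)
  decreasing_by
    · rw [pvGroups_getD]
      rcases eq_or_ne pss [] with h | h
      · subst h; apply Prod.Lex.right; simp [pvTails]
      · exact Prod.Lex.left _ _ (pvM_tails_lt _ _ h)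
    · rw [pvGroups_getD]
      rcases eq_or_ne pss [] with h | h
      · subst h; apply Prod.Lex.right; simp [pvTails]
      · exact Prod.Lex.left _ _ (pvM_tails_lt _ _ h)
    · apply Prod.Lex.right; subst_vars; simp
end

def render_output_tree_alt (raw_paths : List String) : String :=
  if raw_paths.isEmpty then "" else
  let cleaned := pvCleanPaths raw_paths
  let tree_lines := "<BACTOPIA_DIR>" :: pvRenderGroups (cleaned.map (fun p => pvSplitSlash p)) ""
  "### Expected Output Files\n\n" ++ "```\n" ++ PySem.Str.join "\n" tree_lines ++ "\n```\n"

-- ===== PRECONDITION & SPEC =====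
def Spec_render_output_tree (raw_paths : List String) (out : String) : Prop := out = render_output_tree_alt raw_paths
instance (raw_paths : List String) (out : String) : Decidable (Spec_render_output_tree raw_paths out) := by unfold Spec_render_output_tree; infer_instance

-- ===== CLAIM (what is proved, stated in full; the proofs are below) =====
def Claim_equal_render_output_tree : Prop := ∀ (raw_paths : List String), Dom_render_output_tree raw_paths → Spec_render_output_tree raw_paths (render_output_tree raw_paths)

-- ===== LEMMAS AND PROOFS =====

def PyTrieKids.keys : PyTrieKids → List String
  | .nil => []
  | .cons k _ r => k :: r.keys

-- node[name] (an empty node as default; A only looks up keys that are present)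
def PyTrieKids.childD : PyTrieKids → String → PyTrie
  | .nil, _ => .node .nil
  | .cons k t r, s => if k == s then t else r.childD s

def PyTrie.kidsOf : PyTrie → PyTrieKids
  | .node kids => kids


-- split always yields at least one piece
theorem pvSplitGoLen (sep : List Char) : ∀ (fuel : Nat) (l cur : List Char) (acc : List (List Char)),
    acc.length < (PySem.Chars.splitOn.go sep fuel l cur acc).length
  | 0, l, cur, acc => by simp [PySem.Chars.splitOn.go]
  | fuel+1, [], cur, acc => by simp [PySem.Chars.splitOn.go]
  | fuel+1, c :: rest, cur, acc => by
    rw [PySem.Chars.splitOn.go]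
    split
    · have := pvSplitGoLen sep fuel (List.drop sep.length (c :: rest)) [] (cur.reverse :: acc)
      simp at this ⊢; omega
    · exact pvSplitGoLen sep fuel rest (c :: cur) acc

theorem pvSplitSlash_ne_nil (p : String) : pvSplitSlash p ≠ [] := by
  have h := pvSplitGoLen "/".toList (p.toList.length+1) p.toList [] []
  simp [pvSplitSlash, PySem.Str.split?, PySem.Chars.split?, PySem.Chars.splitOn] at h ⊢
  intro hcon
  rw [hcon] at h; simp at h

theorem pvInsert_nil (t : PyTrie) : t.insert [] = t := by
  cases t; rw [PyTrie.insert]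

-- inserting a path adds (at most) its head to the keys …
theorem pvKeys_insertPath : ∀ (kids : PyTrieKids) (s : String) (rest : List String),
    (PyTrieKids.insertPath kids s rest).keys = PySem.Set.add kids.keys s
  | .nil, s, rest => by
    simp [PyTrieKids.insertPath, PyTrieKids.keys, PySem.Set.add, PySem.Set.contains]
  | .cons k t r, s, rest => by
    rw [PyTrieKids.insertPath]
    by_cases h : k == s
    · simp [PyTrieKids.keys, PySem.Set.add, PySem.Set.contains, eq_of_beq h]
    · have ih := pvKeys_insertPath r s rest
      simp [h, PyTrieKids.keys, ih, PySem.Set.add, PySem.Set.contains]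
      have : ¬ s = k := fun hh => by simp [hh] at h
      simp [this]
      split <;> simp [PyTrieKids.keys]

-- … and changes exactly the child named by its head
theorem pvChildD_insertPath : ∀ (kids : PyTrieKids) (s : String) (rest : List String) (name : String),
    (PyTrieKids.insertPath kids s rest).childD name =
      if s == name then (kids.childD name).insert rest else kids.childD name
  | .nil, s, rest, name => by
    by_cases h : s == name <;>
      simp [PyTrieKids.insertPath, PyTrieKids.childD, h]
  | .cons k t r, s, rest, name => by
    rw [PyTrieKids.insertPath]
    by_cases hks : k == s
    · have hks' : k = s := eq_of_beq hks
      subst hks'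
      by_cases hn : k == name
      · simp [PyTrieKids.childD, eq_of_beq hn]
      · simp [hn, PyTrieKids.childD]
    · have ih := pvChildD_insertPath r s rest name
      by_cases hn : k == name
      · have : ¬ s == name := fun hh => hks (by simp [eq_of_beq hh, eq_of_beq hn])
        simp [hks, hn, PyTrieKids.childD, this]
      · simp [hks, hn, PyTrieKids.childD, ih]

-- the keys of the built trie are the distinct first segments, in first-insertion order
theorem pvFoldKeys : ∀ (pss : List (List String)) (t : PyTrie), (∀ ps ∈ pss, ps ≠ []) →
    (pss.foldl PyTrie.insert t).kidsOf.keys =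
      pss.foldl (fun s ps => PySem.Set.add s (ps.headD "")) t.kidsOf.keys
  | [], _, _ => rfl
  | ps :: rest, .node kids, h => by
    match ps, h ps (by simp) with
    | s :: tl, _ =>
      simp only [List.foldl_cons]
      rw [pvFoldKeys rest _ (fun q hq => h q (by simp [hq]))]
      simp [PyTrie.insert, PyTrie.kidsOf, pvKeys_insertPath]

-- the subtree under `name` is the trie of the non-empty remainders of the `name`-headed paths
theorem pvFoldChild : ∀ (pss : List (List String)) (t : PyTrie) (name : String),
    (∀ ps ∈ pss, ps ≠ []) →
    (pss.foldl PyTrie.insert t).kidsOf.childD name =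
      (pvTails name pss).foldl PyTrie.insert (t.kidsOf.childD name)
  | [], _, _, _ => rfl
  | ps :: rest, .node kids, name, h => by
    match ps, h ps (by simp) with
    | s :: tl, _ =>
      simp only [List.foldl_cons]
      rw [pvFoldChild rest _ name (fun q hq => h q (by simp [hq]))]
      have hch : (PyTrie.insert (.node kids) (s :: tl)).kidsOf.childD name =
          if s == name then ((PyTrie.node kids).kidsOf.childD name).insert tl
          else (PyTrie.node kids).kidsOf.childD name := by
        simp [PyTrie.insert, PyTrie.kidsOf, pvChildD_insertPath]
      by_cases hs : s == name
      · have hs' : s = name := eq_of_beq hs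
        match tl with
        | [] => rw [hch]; simp [pvTails, hs, hs', List.filterMap_cons, pvInsert_nil]
        | y :: tl' => rw [hch]; simp [pvTails, hs, hs', List.filterMap_cons]
      · have hs' : ¬ s = name := fun hh => hs (by simp [hh])
        match tl with
        | [] => rw [hch]; simp [pvTails, hs, hs', List.filterMap_cons]
        | y :: tl' => rw [hch]; simp [pvTails, hs, hs', List.filterMap_cons]

-- with distinct keys the entry list is the key list paired with the respective children
theorem pvEntries_eq_map_keys : ∀ (kids : PyTrieKids), kids.keys.Nodup →
    kids.entries = kids.keys.map (fun k => (k, kids.childD k))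
  | .nil, _ => rfl
  | .cons k t r, h => by
    simp only [PyTrieKids.keys, List.nodup_cons] at h
    obtain ⟨hk, hr⟩ := h
    have ih := pvEntries_eq_map_keys r hr
    simp only [PyTrieKids.entries, PyTrieKids.keys, List.map_cons, PyTrieKids.childD]
    rw [List.cons_eq_cons]
    refine ⟨by simp, ?_⟩
    rw [ih]
    apply List.map_congr_left
    intro k' hk'
    have : ¬ k == k' := fun hh => hk (by rw [eq_of_beq hh]; exact hk')
    simp [this]

-- sorting the entries by key = sorting the keys and looking each child up
theorem pvSortedEntries (kids : PyTrieKids) (h : kids.keys.Nodup) :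
    PySem.List.sorted kids.entries (fun e => e.1) =
      (PySem.List.sorted kids.keys (fun x => x)).map (fun k => (k, kids.childD k)) := by
  apply PySem.List.sorted_eq_of_perm_of_pairwise_lt
  · have hperm : ((PySem.List.sorted kids.keys (fun x => x)).map (fun k => (k, kids.childD k))).Perm
        (kids.keys.map (fun k => (k, kids.childD k))) :=
      (PySem.List.sorted_perm kids.keys (fun x => x) false).map _
    rw [← pvEntries_eq_map_keys kids h] at hperm
    exact hperm
  · rw [List.pairwise_map]
    have h1 := PySem.List.sorted_pairwise kids.keys (fun x : String => x)
    have h2 : (PySem.List.sorted kids.keys (fun x => x)).Nodup :=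
      ((PySem.List.sorted_perm kids.keys (fun x : String => x) false).nodup_iff).mpr h
    have h3 := List.Pairwise.and h1 h2
    exact h3.imp (fun hab => lt_of_le_of_ne hab.1 hab.2)

theorem pvTails_ne_nil (name : String) (pss : List (List String)) :
    ∀ ps ∈ pvTails name pss, ps ≠ [] := by
  intro ps hps
  simp only [pvTails, List.mem_filterMap] at hps
  obtain ⟨qs, _, hq⟩ := hps
  match qs with
  | [] => simp at hq
  | [x] => simp at hq
  | x :: y :: t =>
    by_cases h : x == name <;> simp [h] at hq
    exact hq ▸ (by simp)

theorem pvFoldKeys_ofList (pss : List (List String)) (hne : ∀ ps ∈ pss, ps ≠ []) :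
    (pss.foldl PyTrie.insert (PyTrie.node .nil)).kidsOf.keys =
      PySem.Set.ofList (pss.map (fun ps => ps.headD "")) := by
  rw [pvFoldKeys pss _ hne]
  rw [PySem.Set.ofList_eq_foldl, List.foldl_map]
  rfl

-- the two render loops agree name by name, given agreement on each subtree
theorem pv_aux : ∀ (names : List String) (pss : List (List String)) (pre : String),
    (∀ (name : String) (pre' : String),
      PyTrie.render ((pvTails name pss).foldl PyTrie.insert (PyTrie.node .nil)) pre' =
        pvRenderGroups (pvTails name pss) pre') →
    PyTrie.renderEntries
        (names.map (fun k => (k, (pvTails k pss).foldl PyTrie.insert (PyTrie.node .nil)))) pre =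
      pvRenderNames names pss pre
  | [], _, _, _ => by
    rw [List.map_nil, PyTrie.renderEntries, pvRenderNames]
  | [name], pss, pre, H => by
    simp only [List.map_cons, List.map_nil]
    rw [PyTrie.renderEntries, pvRenderNames, pvGroups_getD, H]
  | name :: y :: rest, pss, pre, H => by
    have ih := pv_aux (y :: rest) pss pre H
    simp only [List.map_cons] at ih ⊢
    rw [PyTrie.renderEntries, pvRenderNames, pvGroups_getD, H, ih]

-- main equivalence: rendering the trie of a list of non-empty segment lists
-- = rendering the grouped segment lists directly (strong induction on total size)
theorem pv_main : ∀ (N : Nat) (pss : List (List String)), pvM pss ≤ N →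
    (∀ ps ∈ pss, ps ≠ []) → ∀ (pre : String),
    PyTrie.render (pss.foldl PyTrie.insert (PyTrie.node .nil)) pre = pvRenderGroups pss pre := by
  intro N
  induction N with
  | zero =>
    intro pss hM hne pre
    have hnil : pss = [] := by
      cases pss with
      | nil => rfl
      | cons ps rest => simp [pvM] at hM
    subst hnil
    rw [pvRenderGroups]
    simp only [List.foldl_nil]
    rw [PyTrie.render]
    have h0 : PySem.List.sorted ([] : List String) (fun x => x) = [] := rfl
    have h1 : PySem.List.sorted (PyTrieKids.nil.entries) (fun (e : String × PyTrie) => e.1) = [] := rfl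
    have h2 : PySem.Set.ofList (List.map (fun ps => ps.headD "") ([] : List (List String))) = [] := rfl
    rw [h2, h0, h1, PyTrie.renderEntries, pvRenderNames]
  | succ n ih =>
    intro pss hM hne pre
    cases htrie : pss.foldl PyTrie.insert (PyTrie.node .nil) with
    | node kids =>
      have hkeys : kids.keys = PySem.Set.ofList (pss.map (fun ps => ps.headD "")) := by
        have := pvFoldKeys_ofList pss hne
        rw [htrie] at this
        exact this
      have hnodup : kids.keys.Nodup := by
        rw [hkeys]; exact PySem.Set.nodup_ofList _
      have hch : ∀ k, kids.childD k = (pvTails k pss).foldl PyTrie.insert (PyTrie.node .nil) := by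
        intro k
        have := pvFoldChild pss (PyTrie.node .nil) k hne
        rw [htrie] at this
        simpa [PyTrie.kidsOf, PyTrieKids.childD] using this
      rw [PyTrie.render, pvSortedEntries kids hnodup, hkeys]
      have hmap : ((PySem.List.sorted (PySem.Set.ofList (pss.map (fun ps => ps.headD ""))) (fun x => x)).map
            (fun k => (k, kids.childD k)))
          = ((PySem.List.sorted (PySem.Set.ofList (pss.map (fun ps => ps.headD ""))) (fun x => x)).map
            (fun k => (k, (pvTails k pss).foldl PyTrie.insert (PyTrie.node .nil)))) := by
        apply List.map_congr_left
        intro k _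
        rw [hch k]
      rw [hmap, pvRenderGroups]
      apply pv_aux
      intro name pre'
      rcases eq_or_ne pss [] with hn | hn
      · subst hn
        apply ih
        · simp [pvTails, pvM]
        · exact pvTails_ne_nil name []
      · apply ih
        · have := pvM_tails_lt name pss hn; omega
        · exact pvTails_ne_nil name pss

-- ===== VERDICT (by name: the statement is the Claim_ definition above) =====
theorem render_output_tree_spec : Claim_equal_render_output_tree := by
  intro raw_paths _
  unfold Spec_render_output_tree render_output_tree render_output_tree_alt
  by_cases h : raw_paths.isEmpty
  · simp [h]
  · simp only [h, if_false, Bool.false_eq_true]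
    have hfold : (pvCleanPaths raw_paths).foldl (fun t p => t.insert (pvSplitSlash p)) (PyTrie.node .nil)
        = ((pvCleanPaths raw_paths).map (fun p => pvSplitSlash p)).foldl PyTrie.insert (PyTrie.node .nil) :=
      (List.foldl_map (f := fun p => pvSplitSlash p) (g := PyTrie.insert)).symm
    rw [hfold, pv_main (pvM ((pvCleanPaths raw_paths).map (fun p => pvSplitSlash p))) _ (le_refl _)]
    intro ps hps
    obtain ⟨p, _, hp⟩ := List.mem_map.mp hps
    exact hp ▸ pvSplitSlash_ne_nil p
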